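-- pv_equiv track=rewrite | github.com/philhanna/crossword | tools/user/grid_generator.py | row_has_only_legal_white_runs
-- ===== SOURCE A (Python) =====
-- from typing import Iterable, List, Optional, Sequence, Tuple
--
-- WHITE = "."
--
-- def row_has_only_legal_white_runs(row: Sequence[str]) -> bool:
--     """Return True iff every maximal WHITE run in the row has length >= 3."""
--     n = len(row)
--     c = 0
--     while c < n:
--         if row[c] == WHITE:
--             start = c
--             while c < n and row[c] == WHITE:
--                 c += 1
--             if c - start < 3:
--                 return False
--         else:
--             c += 1
--     return True
-- ===== SOURCE B (Python) =====
-- WHITE = "."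
--
-- def row_has_only_legal_white_runs(row):
--     """Return True iff every maximal WHITE run in the row has length >= 3."""
--     mask = ''.join('.' if cell == WHITE else '#' for cell in row)
--     return all(len(seg) == 0 or len(seg) >= 3 for seg in mask.split('#'))
-- ===== Notes on version B (the rewrite author's own statement) =====
-- stated objective: idiomatic
-- what changed: Replaces the per-cell index cursor with nested while loops by a mask-and-split formulation: build a '.'/'#' mask string once, split it on '#' into maximal white segments, and check every segment is empty or of length >= 3.
import Mathlib
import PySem

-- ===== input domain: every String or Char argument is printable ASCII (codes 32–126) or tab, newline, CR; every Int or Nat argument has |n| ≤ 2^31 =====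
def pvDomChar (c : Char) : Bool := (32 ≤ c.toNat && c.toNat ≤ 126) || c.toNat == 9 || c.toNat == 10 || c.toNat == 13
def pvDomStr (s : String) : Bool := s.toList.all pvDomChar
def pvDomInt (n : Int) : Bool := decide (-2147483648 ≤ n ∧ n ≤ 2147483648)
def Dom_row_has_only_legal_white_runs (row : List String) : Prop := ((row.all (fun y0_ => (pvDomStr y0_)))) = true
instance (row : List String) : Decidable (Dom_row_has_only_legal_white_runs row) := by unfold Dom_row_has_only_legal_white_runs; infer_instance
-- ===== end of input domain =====

-- B replaces A's per-cell index-cursor scan by a mask-and-split formulation (more idiomatic; same cost).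

-- ===== PORT A =====
-- inner while loop of A: advance c while c < n and row[c] == WHITE
def pvInnerA (row : List String) (n c : Nat) : Nat :=
  if c < n ∧ row.getD c "" == "." then pvInnerA row n (c + 1) else c
termination_by n - c
decreasing_by omega

-- needed by pvOuterA's termination proof: the cursor never moves backwards
theorem pvInnerA_ge (row : List String) (n c : Nat) : c ≤ pvInnerA row n c := by
  unfold pvInnerA
  split
  · exact le_trans (by omega) (pvInnerA_ge row n (c + 1))
  · exact le_refl c
termination_by n - c
decreasing_by rename_i h; omega

-- outer while loop of A
def pvOuterA (row : List String) (n c : Nat) : Bool :=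
  if h : c < n then
    if hw : row.getD c "" == "." then
      -- start = c; run the inner while; then the length test
      let c' := pvInnerA row n c
      if c' - c < 3 then false else pvOuterA row n c'
    else pvOuterA row n (c + 1)
  else true
termination_by n - c
decreasing_by
  · have h1 : c + 1 ≤ pvInnerA row n (c + 1) := pvInnerA_ge row n (c + 1)
    have h2 : pvInnerA row n c = pvInnerA row n (c + 1) := by
      rw [pvInnerA]; simp only [if_pos (And.intro h hw)]
    omega
  · omega

def row_has_only_legal_white_runs (row : List String) : Bool :=
  pvOuterA row row.length 0

-- ===== PORT B =====
-- mask = ''.join('.' if cell == WHITE else '#' for cell in row)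
def pvMask (row : List String) : List Char :=
  row.map (fun cell => if cell == "." then '.' else '#')

-- str.split('#') for the single-character separator '#' (exact: "".split('#') == [''])
def pvSplitHash : List Char → List (List Char)
  | [] => [[]]
  | ch :: t =>
    if ch == '#' then [] :: pvSplitHash t
    else
      match pvSplitHash t with
      | [] => [[ch]]      -- unreachable: pvSplitHash never returns []
      | s :: rest => (ch :: s) :: rest

-- all(len(seg) == 0 or len(seg) >= 3 for seg in mask.split('#'))
def row_has_only_legal_white_runs_alt (row : List String) : Bool :=
  (pvSplitHash (pvMask row)).all (fun seg => seg.length == 0 || 3 ≤ seg.length)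

-- ===== PRECONDITION & SPEC =====
def Spec_row_has_only_legal_white_runs (row : List String) (out : Bool) : Prop := out = row_has_only_legal_white_runs_alt row
instance (row : List String) (out : Bool) : Decidable (Spec_row_has_only_legal_white_runs row out) := by unfold Spec_row_has_only_legal_white_runs; infer_instance

-- ===== CLAIM (what is proved, stated in full; the proofs are below) =====
def Claim_equal_row_has_only_legal_white_runs : Prop := ∀ (row : List String), Dom_row_has_only_legal_white_runs row → Spec_row_has_only_legal_white_runs row (row_has_only_legal_white_runs row)

-- ===== LEMMAS AND PROOFS =====

-- B's check, as a function of a (suffix of the) row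
def pvAltOn (l : List String) : Bool :=
  (pvSplitHash (pvMask l)).all (fun seg => seg.length == 0 || 3 ≤ seg.length)

theorem pvSplitHash_ne_nil (m : List Char) : pvSplitHash m ≠ [] := by
  cases m with
  | nil => simp [pvSplitHash]
  | cons ch t =>
    rw [pvSplitHash]
    split
    · simp
    · cases h : pvSplitHash t <;> simp

theorem pvSplitHash_hash (t : List Char) : pvSplitHash ('#' :: t) = [] :: pvSplitHash t := rfl

theorem pvSplitHash_dot (t : List Char) :
    pvSplitHash ('.' :: t) = ('.' :: (pvSplitHash t).headD []) :: (pvSplitHash t).tail := by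
  rw [pvSplitHash]
  rw [if_neg (by decide)]
  cases h : pvSplitHash t with
  | nil => exact absurd h (pvSplitHash_ne_nil t)
  | cons s rest => simp

-- shape hypothesis on a mask: it does not start with a white cell
def pvNoWhiteHead (m : List Char) : Prop := m = [] ∨ ∃ m', m = '#' :: m'

theorem pvSplitHash_replicate (m : List Char) (hm : pvNoWhiteHead m) (k : Nat) :
    pvSplitHash (List.replicate k '.' ++ m)
      = List.replicate k '.' :: (pvSplitHash m).tail := by
  induction k with
  | zero =>
    rcases hm with h | ⟨m', h⟩ <;> subst h
    · simp [pvSplitHash]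
    · simp [pvSplitHash_hash]
  | succ k ih =>
    rw [List.replicate_succ, List.cons_append, pvSplitHash_dot, ih]
    simp

theorem pvAll_tail (m : List Char) (hm : pvNoWhiteHead m) :
    (pvSplitHash m).all (fun seg => seg.length == 0 || 3 ≤ seg.length)
      = ((pvSplitHash m).tail).all (fun seg => seg.length == 0 || 3 ≤ seg.length) := by
  rcases hm with h | ⟨m', h⟩ <;> subst h
  · simp [pvSplitHash]
  · rw [pvSplitHash_hash]; simp

-- peeling a leading white run of length k off B's check
theorem pvAltOn_white_run (k : Nat) (t : List String) (hm : pvNoWhiteHead (pvMask t)) :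
    pvAltOn (List.replicate k "." ++ t) = ((k == 0 || 3 ≤ k) && pvAltOn t) := by
  have hmask : pvMask (List.replicate k "." ++ t) = List.replicate k '.' ++ pvMask t := by
    simp [pvMask]
  rw [pvAltOn, hmask, pvSplitHash_replicate (pvMask t) hm k]
  rw [pvAltOn, pvAll_tail (pvMask t) hm]
  simp

-- skipping a non-white head leaves B's verdict unchanged
theorem pvAltOn_cons_black (x : String) (t : List String) (hx : ¬ (x == ".") = true) :
    pvAltOn (x :: t) = pvAltOn t := by
  have hmask : pvMask (x :: t) = '#' :: pvMask t := by
    simp only [pvMask, List.map_cons]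
    congr 1
    simp only [beq_iff_eq] at hx
    simp [hx]
  rw [pvAltOn, hmask, pvSplitHash_hash]
  simp [pvAltOn]

-- characterisation of the inner while loop: it stops right after the leading white run
theorem pvInnerA_eq (row : List String) (c : Nat) :
    pvInnerA row row.length c = c + ((row.drop c).takeWhile (fun x => x == ".")).length := by
  unfold pvInnerA
  by_cases h : c < row.length
  · have hdrop : row.drop c = row[c] :: row.drop (c + 1) := List.drop_eq_getElem_cons h
    have hget : row.getD c "" = row[c] := by
      simp [List.getD, List.getElem?_eq_getElem h]
    by_cases hw : (row[c] == ".") = true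
    · rw [if_pos ⟨h, by rw [hget]; exact hw⟩]
      rw [pvInnerA_eq row (c + 1)]
      rw [hdrop, List.takeWhile_cons, if_pos hw]
      simp; omega
    · rw [if_neg (by rw [hget]; tauto)]
      rw [hdrop, List.takeWhile_cons, if_neg hw]
      simp
  · rw [if_neg (by tauto)]
    have : row.drop c = [] := List.drop_eq_nil_of_le (by omega)
    simp [this]
termination_by row.length - c
decreasing_by omega

-- main loop invariant: A's outer loop from c computes B's check on the suffix row.drop c
theorem pvOuterA_eq (row : List String) (c : Nat) :
    pvOuterA row row.length c = pvAltOn (row.drop c) := by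
  unfold pvOuterA
  by_cases h : c < row.length
  · have hdrop : row.drop c = row[c] :: row.drop (c + 1) := List.drop_eq_getElem_cons h
    have hget : row.getD c "" = row[c] := by
      simp [List.getD, List.getElem?_eq_getElem h]
    by_cases hw : (row[c] == ".") = true
    · rw [dif_pos h, dif_pos (show (row.getD c "" == ".") = true by rw [hget]; exact hw)]
      have hin : pvInnerA row row.length c
          = c + ((row.drop c).takeWhile (fun x => x == ".")).length := pvInnerA_eq row c
      set k := ((row.drop c).takeWhile (fun x => x == ".")).length with hkdef
      -- the leading white run is literally a replicate of "."
      have hrep : (row.drop c).takeWhile (fun x => x == ".") = List.replicate k "." := by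
        rw [List.eq_replicate_iff]
        refine ⟨rfl, fun b hb => ?_⟩
        have := List.mem_takeWhile_imp hb
        simpa using this
      have h1 : (row.drop c).takeWhile (fun x => x == ".")
          ++ (row.drop c).dropWhile (fun x => x == ".") = row.drop c :=
        List.takeWhile_append_dropWhile
      -- the rest of the row after the run
      have h2 : (row.drop c).dropWhile (fun x => x == ".") = row.drop (c + k) := by
        have h3 : (row.drop c).drop k = row.drop (c + k) := List.drop_drop
        have h4 : (row.drop c).drop k = (row.drop c).dropWhile (fun x => x == ".") := by
          conv_lhs => rw [← h1, hrep]
          exact List.drop_left' (by simp)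
        rw [← h4, h3]
      have hsplit : row.drop c = List.replicate k "." ++ row.drop (c + k) := by
        rw [← h2, ← hrep]; exact h1.symm
      -- after the run, the next cell (if any) is not white
      have hnw : pvNoWhiteHead (pvMask (row.drop (c + k))) := by
        cases hh : row.drop (c + k) with
        | nil => left; simp [pvMask]
        | cons y u =>
          right
          have hhd := List.head?_dropWhile_not (fun x => x == ".") (row.drop c)
          rw [h2, hh] at hhd
          simp only [List.head?] at hhd
          refine ⟨pvMask u, ?_⟩
          simp only [pvMask, List.map_cons]
          rw [if_neg (by simpa using hhd)]
      have hk1 : 1 ≤ k := by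
        rw [hkdef, hdrop, List.takeWhile_cons, if_pos hw]
        simp
      show (if pvInnerA row row.length c - c < 3 then false
            else pvOuterA row row.length (pvInnerA row row.length c)) = pvAltOn (row.drop c)
      rw [hin]
      by_cases h3 : c + k - c < 3
      · rw [if_pos h3]
        conv_rhs => rw [hsplit]
        rw [pvAltOn_white_run k _ hnw]
        have hc : ¬ ((k == 0 || decide (3 ≤ k)) = true) := by simp; omega
        simp only [Bool.not_eq_true] at hc
        rw [hc, Bool.false_and]
      · rw [if_neg h3]
        conv_rhs => rw [hsplit]
        rw [pvAltOn_white_run k _ hnw]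
        have hc : (k == 0 || decide (3 ≤ k)) = true := by simp; omega
        rw [hc, Bool.true_and]
        exact pvOuterA_eq row (c + k)
    · rw [dif_pos h, dif_neg (show ¬ (row.getD c "" == ".") = true by rw [hget]; exact hw)]
      rw [pvOuterA_eq row (c + 1), hdrop]
      exact (pvAltOn_cons_black _ _ hw).symm
  · rw [dif_neg (by tauto)]
    have : row.drop c = [] := List.drop_eq_nil_of_le (by omega)
    rw [this]
    simp [pvAltOn, pvMask, pvSplitHash]
termination_by row.length - c
decreasing_by
  · have hlen := congrArg List.length hsplit
    simp at hlen
    omega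
  · omega

-- ===== VERDICT (by name: the statement is the Claim_ definition above) =====
theorem row_has_only_legal_white_runs_spec : Claim_equal_row_has_only_legal_white_runs := by
  intro row _
  unfold Spec_row_has_only_legal_white_runs row_has_only_legal_white_runs row_has_only_legal_white_runs_alt
  have := pvOuterA_eq row 0
  simpa [pvAltOn] using this
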